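-- pv_equiv track=rewrite | github.com/Horus0x502x/projetc | scripts/python/pe_recon.py | categorize_dlls
-- ===== SOURCE A (Python) =====
-- DLL_CATEGORIES = {
--     "réseau": {"WS2_32.dll", "WININET.dll", "WINHTTP.dll", "IPHLPAPI.DLL", "DNSAPI.dll"},
--     "graphique": {"d3d9.dll", "d3dx9_43.dll", "OPENGL32.dll", "GDI32.dll", "dwmapi.dll"},
--     "input": {"XINPUT1_3.dll", "DINPUT8.dll", "HID.DLL"},
--     "audio": {"WINMM.dll", "DSOUND.dll", "XAUDIO2_7.dll"},
--     "système": {"KERNEL32.dll", "USER32.dll", "ADVAPI32.dll", "SHELL32.dll",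
--                 "ole32.dll", "SHLWAPI.dll", "COMCTL32.dll", "SETUPAPI.dll",
--                 "ntdll.dll", "msvcrt.dll"},
--     "crypto/debug": {"bcrypt.dll", "dbghelp.dll", "crypt32.dll"},
-- }
--
-- def categorize_dlls(dlls: list[str]) -> dict[str, list[str]]:
--     bag = {cat: [] for cat in DLL_CATEGORIES}
--     bag["autres"] = []
--     for d in dlls:
--         placed = False
--         for cat, members in DLL_CATEGORIES.items():
--             if d in members:
--                 bag[cat].append(d)
--                 placed = True
--                 break
--         if not placed:
--             bag["autres"].append(d)
--     return {k: v for k, v in bag.items() if v}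
-- ===== SOURCE B (Python) =====
-- DLL_CATEGORIES = {
--     "réseau": {"WS2_32.dll", "WININET.dll", "WINHTTP.dll", "IPHLPAPI.DLL", "DNSAPI.dll"},
--     "graphique": {"d3d9.dll", "d3dx9_43.dll", "OPENGL32.dll", "GDI32.dll", "dwmapi.dll"},
--     "input": {"XINPUT1_3.dll", "DINPUT8.dll", "HID.DLL"},
--     "audio": {"WINMM.dll", "DSOUND.dll", "XAUDIO2_7.dll"},
--     "système": {"KERNEL32.dll", "USER32.dll", "ADVAPI32.dll", "SHELL32.dll",
--                 "ole32.dll", "SHLWAPI.dll", "COMCTL32.dll", "SETUPAPI.dll",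
--                 "ntdll.dll", "msvcrt.dll"},
--     "crypto/debug": {"bcrypt.dll", "dbghelp.dll", "crypt32.dll"},
-- }
--
-- def categorize_dlls(dlls: list[str]) -> dict[str, list[str]]:
--     # Flat reverse index built once: dll name -> category (first listed wins).
--     reverse = {}
--     for cat, members in DLL_CATEGORIES.items():
--         for m in members:
--             reverse.setdefault(m, cat)
--     bag = {cat: [] for cat in DLL_CATEGORIES}
--     bag["autres"] = []
--     for d in dlls:
--         bag[reverse.get(d, "autres")].append(d)
--     return {k: v for k, v in bag.items() if v}
-- ===== Notes on version B (the rewrite author's own statement) =====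
-- stated objective: faster
-- what changed: Replaces the per-dll inner scan over all categories (with a 'placed' flag and break) by a flat reverse dict built once from DLL_CATEGORIES, so each dll is categorized by a single O(1) dict lookup in one pass.
import Mathlib
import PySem

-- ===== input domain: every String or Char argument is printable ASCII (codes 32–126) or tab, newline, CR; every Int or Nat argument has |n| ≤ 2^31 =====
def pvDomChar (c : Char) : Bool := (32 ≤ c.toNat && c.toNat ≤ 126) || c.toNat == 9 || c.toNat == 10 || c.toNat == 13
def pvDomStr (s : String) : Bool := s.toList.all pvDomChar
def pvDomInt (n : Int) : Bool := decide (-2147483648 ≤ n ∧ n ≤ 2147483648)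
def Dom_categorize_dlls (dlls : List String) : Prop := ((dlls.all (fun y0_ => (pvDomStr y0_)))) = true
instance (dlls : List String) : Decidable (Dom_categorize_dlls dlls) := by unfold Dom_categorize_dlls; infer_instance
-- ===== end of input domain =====

-- B replaces A's per-dll scan over the categories by a reverse dll→category dict built once (idiomatic; same return value).

-- ===== PORT A =====
-- module constant DLL_CATEGORIES (shared by A and B, as in Python); set literals as PySem.Set
def DLL_CATEGORIES : List (String × PySem.Set String) :=
  [("réseau", PySem.Set.ofList ["WS2_32.dll", "WININET.dll", "WINHTTP.dll", "IPHLPAPI.DLL", "DNSAPI.dll"]),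
   ("graphique", PySem.Set.ofList ["d3d9.dll", "d3dx9_43.dll", "OPENGL32.dll", "GDI32.dll", "dwmapi.dll"]),
   ("input", PySem.Set.ofList ["XINPUT1_3.dll", "DINPUT8.dll", "HID.DLL"]),
   ("audio", PySem.Set.ofList ["WINMM.dll", "DSOUND.dll", "XAUDIO2_7.dll"]),
   ("système", PySem.Set.ofList ["KERNEL32.dll", "USER32.dll", "ADVAPI32.dll", "SHELL32.dll",
               "ole32.dll", "SHLWAPI.dll", "COMCTL32.dll", "SETUPAPI.dll",
               "ntdll.dll", "msvcrt.dll"]),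
   ("crypto/debug", PySem.Set.ofList ["bcrypt.dll", "dbghelp.dll", "crypt32.dll"])]

-- A's inner 'for cat, members … if d in members: append; placed = True; break' / 'if not placed: append to autres'
def aPlace (bag : PySem.Dict String (List String)) (d : String) :
    List (String × PySem.Set String) → PySem.Dict String (List String)
  | [] => bag.modify "autres" [] (· ++ [d])
  | (cat, members) :: rest =>
      if members.contains d then bag.modify cat [] (· ++ [d])
      else aPlace bag d rest

def categorize_dlls (dlls : List String) : List (String × List String) :=
  let bag0 := (DLL_CATEGORIES.foldl (fun b p => b.insert p.1 []) PySem.Dict.empty).insert "autres" []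
  let bag := dlls.foldl (fun b d => aPlace b d DLL_CATEGORIES) bag0
  bag.items.filter (fun p => !p.2.isEmpty)

-- ===== PORT B =====
def categorize_dlls_alt (dlls : List String) : List (String × List String) :=
  let reverse := DLL_CATEGORIES.foldl
    (fun r p => p.2.foldl (fun r m => r.setdefault m p.1) r) PySem.Dict.empty
  let bag0 := (DLL_CATEGORIES.foldl (fun b p => b.insert p.1 []) PySem.Dict.empty).insert "autres" []
  let bag := dlls.foldl (fun b d => b.modify (reverse.getD d "autres") [] (· ++ [d])) bag0
  bag.items.filter (fun p => !p.2.isEmpty)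

-- ===== PRECONDITION & SPEC =====
def Spec_categorize_dlls (dlls : List String) (out : List (String × List String)) : Prop := out = categorize_dlls_alt dlls
instance (dlls : List String) (out : List (String × List String)) : Decidable (Spec_categorize_dlls dlls out) := by unfold Spec_categorize_dlls; infer_instance

-- ===== CLAIM (what is proved, stated in full; the proofs are below) =====
def Claim_equal_categorize_dlls : Prop := ∀ (dlls : List String), Dom_categorize_dlls dlls → Spec_categorize_dlls dlls (categorize_dlls dlls)

-- ===== LEMMAS AND PROOFS =====

-- the first category whose member set contains d, else "autres"
def firstCat (d : String) : List (String × PySem.Set String) → String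
  | [] => "autres"
  | (cat, members) :: rest => if members.contains d then cat else firstCat d rest

lemma aPlace_eq (d : String) (cats : List (String × PySem.Set String))
    (bag : PySem.Dict String (List String)) :
    aPlace bag d cats = bag.modify (firstCat d cats) [] (· ++ [d]) := by
  induction cats with
  | nil => rfl
  | cons p rest ih =>
    obtain ⟨cat, members⟩ := p
    simp only [aPlace, firstCat]
    split <;> simp [ih]

lemma get?_setdefault_fold (ms : List String) (c : String)
    (acc : PySem.Dict String String) (d : String) :
    (ms.foldl (fun r m => r.setdefault m c) acc).get? d
      = (acc.get? d).or (if ms.contains d then some c else none) := by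
  induction ms generalizing acc with
  | nil => simp
  | cons m ms ih =>
    simp only [List.foldl_cons, ih, List.contains_cons]
    by_cases h : d = m
    · subst h
      rw [PySem.Dict.get?_setdefault_self]
      cases hx : acc.get? d <;> simp [Option.or]
    · rw [PySem.Dict.get?_setdefault_of_ne acc c h]
      have : (d == m) = false := by simp [h]
      simp [this]

lemma rev_get? (cats : List (String × PySem.Set String))
    (acc : PySem.Dict String String) (d : String) :
    (cats.foldl (fun r p => p.2.foldl (fun r m => r.setdefault m p.1) r) acc).getD d "autres"
      = ((acc.get? d).getD (firstCat d cats)) := by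
  induction cats generalizing acc with
  | nil => simp [firstCat, PySem.Dict.getD_eq_get?_getD]
  | cons p rest ih =>
    obtain ⟨cat, members⟩ := p
    simp only [List.foldl_cons, firstCat, ih, get?_setdefault_fold]
    split
    · next h =>
      have h' : d ∈ members := by simpa using h
      cases hx : acc.get? d <;> simp [h', Option.or]
    · next h =>
      have h' : d ∉ members := by simpa using h
      cases hx : acc.get? d <;> simp [h', Option.or]

lemma foldl_congr' {α β : Type} (f g : β → α → β) (h : ∀ b a, f b a = g b a)
    (l : List α) (b : β) : l.foldl f b = l.foldl g b := by
  induction l generalizing b with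
  | nil => rfl
  | cons x xs ih => simp only [List.foldl_cons, h, ih]

-- ===== VERDICT (by name: the statement is the Claim_ definition above) =====
theorem categorize_dlls_spec : Claim_equal_categorize_dlls := by
  intro dlls _
  unfold Spec_categorize_dlls categorize_dlls categorize_dlls_alt
  have hrev : ∀ d : String,
      (DLL_CATEGORIES.foldl (fun r p => p.2.foldl (fun r m => r.setdefault m p.1) r)
        PySem.Dict.empty).getD d "autres" = firstCat d DLL_CATEGORIES := by
    intro d
    rw [rev_get?]
    simp [PySem.Dict.get?_empty]
  have hstep : ∀ (b : PySem.Dict String (List String)) (d : String),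
      aPlace b d DLL_CATEGORIES
        = b.modify ((DLL_CATEGORIES.foldl (fun r p => p.2.foldl (fun r m => r.setdefault m p.1) r)
            PySem.Dict.empty).getD d "autres") [] (· ++ [d]) := by
    intro b d
    rw [hrev, aPlace_eq]
  simp only [foldl_congr' _ _ hstep]
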